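-- pv_equiv track=rewrite | github.com/carrigar11/HR_report_tubematic | backend/core/excel_upload.py | _next_available_emp_code
-- ===== SOURCE A (Python) =====
-- def _next_available_emp_code(existing_codes, used_in_upload, prefix='UPL'):
--     """Return an emp_code not in existing_codes and not in used_in_upload."""
--     n = 1
--     while True:
--         code = f"{prefix}{n}"
--         if code not in existing_codes and code not in used_in_upload:
--             used_in_upload.add(code)
--             return code
--         n += 1
-- ===== SOURCE B (Python) =====
-- def _next_available_emp_code(existing_codes, used_in_upload, prefix='UPL'):
--     """Return an emp_code not in existing_codes and not in used_in_upload.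
--
--     Instead of probing prefix1, prefix2, ... against the sets, collect the
--     numeric suffixes already taken (codes that are exactly prefix + a
--     positive decimal without leading zeros), sort them, and sweep once for
--     the first gap.  Mutates used_in_upload like the original.
--     """
--     taken = []
--     for c in list(existing_codes) + list(used_in_upload):
--         if c.startswith(prefix):
--             rest = c[len(prefix):]
--             if rest.isdigit() and rest[0] != '0':
--                 v = 0
--                 for ch in rest:
--                     v = v * 10 + (ord(ch) - 48)
--                 taken.append(v)
--     n = 1
--     for v in sorted(taken):
--         if v == n:
--             n += 1
--         elif v > n:
--             break
--     code = prefix + str(n)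
--     used_in_upload.add(code)
--     return code
-- ===== Notes on version B (the rewrite author's own statement) =====
-- stated objective: alternative
-- what changed: A probes prefix1, prefix2, ... against both sets until one is free; B instead parses every taken code's numeric suffix (only codes that are exactly prefix + a positive decimal without leading zeros), sorts the suffixes once and sweeps them once for the first gap.
import Mathlib
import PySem

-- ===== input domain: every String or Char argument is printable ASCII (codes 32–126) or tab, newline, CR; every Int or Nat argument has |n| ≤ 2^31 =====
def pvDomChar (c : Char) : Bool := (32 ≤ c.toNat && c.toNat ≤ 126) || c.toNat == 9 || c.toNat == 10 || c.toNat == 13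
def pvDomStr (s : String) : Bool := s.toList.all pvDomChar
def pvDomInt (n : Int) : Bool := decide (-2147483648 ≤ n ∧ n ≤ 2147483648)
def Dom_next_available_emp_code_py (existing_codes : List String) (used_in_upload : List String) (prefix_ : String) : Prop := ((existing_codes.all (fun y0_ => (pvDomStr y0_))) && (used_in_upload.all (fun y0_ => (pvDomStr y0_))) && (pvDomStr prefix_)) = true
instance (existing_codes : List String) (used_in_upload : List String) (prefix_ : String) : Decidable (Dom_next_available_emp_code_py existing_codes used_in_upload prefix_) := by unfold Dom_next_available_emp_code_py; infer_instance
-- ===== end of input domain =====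

-- B replaces A's probe-the-sets loop by parse-the-taken-suffixes, sort once, and a single
-- sweep for the first gap (objective: alternative algorithm).  Both Pythons also add the
-- returned code to used_in_upload; that side effect is identical in A and B and the
-- equivalence proved here is about the RETURN value.

-- ===== PORT A =====
-- A's `while True` probe loop.  A free code always exists among the first
-- len(existing)+len(used)+1 probes (pigeonhole, proved below), so the loop is run with
-- that much fuel; the fuel-exhausted branch is unreachable.
def pvALoop (existing_codes used_in_upload : List String) (prefix_ : String) : Nat → Int → String
  | 0, _ => ""
  | fuel + 1, n =>
    let code := prefix_ ++ PySem.Int.toStr n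
    if code ∉ existing_codes ∧ code ∉ used_in_upload then code
    else pvALoop existing_codes used_in_upload prefix_ fuel (n + 1)

def next_available_emp_code_py (existing_codes : List String) (used_in_upload : List String) (prefix_ : String) : String :=
  pvALoop existing_codes used_in_upload prefix_ (existing_codes.length + used_in_upload.length + 1) 1

-- ===== PORT B =====
-- Source B's per-code parser: prefix check, then `rest.isdigit() and rest[0] != '0'`,
-- then the manual ord-accumulator loop.  (ord(ch) - 48 is Nat subtraction here; on the
-- digit characters the guard admits it equals Python's int subtraction.)
def pvParse (prefix_ c : String) : Option Nat :=
  if PySem.Str.startswith c prefix_ then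
    let rest := PySem.List.slice c.toList (some (PySem.Str.len prefix_)) none
    if PySem.Chars.strIsdigit rest ∧ PySem.List.pyGet? rest 0 ≠ some '0' then
      some (rest.foldl (fun v ch => v * 10 + (ch.toNat - 48)) 0)
    else none
  else none

-- Source B's `for v in sorted(taken): if v == n: n += 1; elif v > n: break`
def pvSweep : List Nat → Nat → Nat
  | [], n => n
  | v :: t, n => if v = n then pvSweep t (n + 1) else if n < v then n else pvSweep t n

def next_available_emp_code_py_alt (existing_codes : List String) (used_in_upload : List String) (prefix_ : String) : String :=
  let taken := (existing_codes ++ used_in_upload).foldl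
    (fun acc c => match pvParse prefix_ c with | some v => acc ++ [v] | none => acc) []
  let n := pvSweep (PySem.List.sorted taken (fun x => x) false) 1
  prefix_ ++ PySem.Int.toStr (n : Int)

-- ===== PRECONDITION & SPEC =====
def Spec_next_available_emp_code_py (existing_codes : List String) (used_in_upload : List String) (prefix_ : String) (out : String) : Prop := out = next_available_emp_code_py_alt existing_codes used_in_upload prefix_
instance (existing_codes : List String) (used_in_upload : List String) (prefix_ : String) (out : String) : Decidable (Spec_next_available_emp_code_py existing_codes used_in_upload prefix_ out) := by unfold Spec_next_available_emp_code_py; infer_instance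

-- ===== CLAIM (what is proved, stated in full; the proofs are below) =====
def Claim_equal_next_available_emp_code_py : Prop := ∀ (existing_codes : List String) (used_in_upload : List String) (prefix_ : String), Dom_next_available_emp_code_py existing_codes used_in_upload prefix_ → Spec_next_available_emp_code_py existing_codes used_in_upload prefix_ (next_available_emp_code_py existing_codes used_in_upload prefix_)

-- ===== LEMMAS AND PROOFS =====

-- `prefix + str(k)` for k : Nat, the common value both programs produce.
def pvF (pre : String) (k : Nat) : String := pre ++ PySem.Int.toStr (k : Int)

-- decimal digits of a natural number, in a recursion the proofs can use
def pvDigits (n : Nat) : List Char :=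
  if n < 10 then [Nat.digitChar n]
  else pvDigits (n / 10) ++ [Nat.digitChar (n % 10)]
decreasing_by exact Nat.div_lt_self (by omega) (by omega)

def pvVal (ds : List Char) : Nat := ds.foldl (fun v ch => v * 10 + (ch.toNat - 48)) 0

lemma pvDigits_lt {n : Nat} (h : n < 10) : pvDigits n = [Nat.digitChar n] := by
  rw [pvDigits]; simp [h]

lemma pvDigits_ge {n : Nat} (h : ¬ n < 10) :
    pvDigits n = pvDigits (n / 10) ++ [Nat.digitChar (n % 10)] := by
  rw [pvDigits]; simp [h]

lemma pv_digitChar_toNat {d : Nat} (h : d < 10) : (Nat.digitChar d).toNat = 48 + d := by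
  interval_cases d <;> decide

lemma pv_digitChar_isdigit {d : Nat} (h : d < 10) :
    PySem.Chars.isdigit (Nat.digitChar d) = true := by
  interval_cases d <;> decide

lemma pv_isdigit_bounds {c : Char} (h : PySem.Chars.isdigit c = true) :
    48 ≤ c.toNat ∧ c.toNat ≤ 57 := by
  rw [PySem.Chars.isdigit, Bool.and_eq_true, decide_eq_true_eq, decide_eq_true_eq] at h
  obtain ⟨h1, h2⟩ := h
  rw [Char.le_def, UInt32.le_iff_toNat_le] at h1 h2
  have e0 : ('0').val.toNat = 48 := by decide
  have e9 : ('9').val.toNat = 57 := by decide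
  constructor
  · show 48 ≤ c.val.toNat
    omega
  · show c.val.toNat ≤ 57
    omega

lemma pv_digitChar_val {c : Char} (h : PySem.Chars.isdigit c = true) :
    Nat.digitChar (c.toNat - 48) = c := by
  obtain ⟨h1, h2⟩ := pv_isdigit_bounds h
  have hc : Char.ofNat c.toNat = c := Char.ofNat_toNat c
  set k := c.toNat with hk
  rw [← hc]
  interval_cases k <;> decide

lemma pv_ne_zero_char {c : Char} (h : PySem.Chars.isdigit c = true) (h0 : c ≠ '0') :
    49 ≤ c.toNat := by
  obtain ⟨h1, h2⟩ := pv_isdigit_bounds h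
  rcases Nat.lt_or_ge c.toNat 49 with hlt | hge
  · exfalso
    have h48 : c.toNat = 48 := by omega
    have hc : Char.ofNat c.toNat = c := Char.ofNat_toNat c
    rw [h48] at hc
    have : c = '0' := by rw [← hc]
    exact h0 this
  · exact hge

-- Nat.toDigits really is pvDigits
lemma pv_toDigitsCore_eq (fuel : Nat) : ∀ (n : Nat) (ds : List Char), n < 10 ^ (fuel + 1) →
    Nat.toDigitsCore 10 (fuel + 1) n ds = pvDigits n ++ ds := by
  induction fuel with
  | zero =>
    intro n ds h
    have h10 : n < 10 := by simpa using h
    conv_lhs => rw [Nat.toDigitsCore]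
    simp [Nat.div_eq_of_lt h10, Nat.mod_eq_of_lt h10, pvDigits_lt h10]
  | succ f ih =>
    intro n ds h
    conv_lhs => rw [Nat.toDigitsCore]
    by_cases h10 : n < 10
    · simp [Nat.div_eq_of_lt h10, Nat.mod_eq_of_lt h10, pvDigits_lt h10]
    · have hne : ¬ n / 10 = 0 := by
        intro hz; exact h10 (by omega)
      simp only [hne, if_false]
      have hpow : (10 : Nat) ^ (f + 1 + 1) = 10 ^ (f + 1) * 10 := by ring
      have hdivlt : n / 10 < 10 ^ (f + 1) :=
        (Nat.div_lt_iff_lt_mul (by omega)).mpr (by omega)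
      rw [ih (n / 10) _ hdivlt, pvDigits_ge h10]
      simp

lemma pv_toDigits_eq (n : Nat) : Nat.toDigits 10 n = pvDigits n := by
  rw [Nat.toDigits]
  have h := pv_toDigitsCore_eq n n []
  rw [h (by
    calc n < 10 ^ n := Nat.lt_pow_self (by omega)
    _ ≤ 10 ^ (n + 1) := Nat.pow_le_pow_right (by omega) (by omega))]
  simp

lemma pv_toChars_natCast (k : Nat) : PySem.Int.toChars (k : Int) = pvDigits k := by
  simp [PySem.Int.toChars, pv_toDigits_eq]

lemma pvF_toList (pre : String) (k : Nat) :
    (pvF pre k).toList = pre.toList ++ pvDigits k := by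
  rw [pvF, String.toList_append, PySem.Int.toList_toStr, pv_toChars_natCast]

-- facts about pvDigits
lemma pvDigits_ne_nil (n : Nat) : pvDigits n ≠ [] := by
  by_cases h : n < 10
  · rw [pvDigits_lt h]; simp
  · rw [pvDigits_ge h]; simp

lemma pvDigits_all_isdigit (n : Nat) : ∀ c ∈ pvDigits n, PySem.Chars.isdigit c = true := by
  induction n using Nat.strong_induction_on with
  | _ n ih =>
    by_cases h : n < 10
    · rw [pvDigits_lt h]; intro c hc
      simp at hc; subst hc; exact pv_digitChar_isdigit h
    · rw [pvDigits_ge h]; intro c hc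
      rcases List.mem_append.mp hc with hc | hc
      · exact ih (n / 10) (Nat.div_lt_self (by omega) (by omega)) c hc
      · simp at hc; subst hc
        exact pv_digitChar_isdigit (Nat.mod_lt _ (by omega))

lemma pvDigits_head {n : Nat} (h : 1 ≤ n) : (pvDigits n).head? ≠ some '0' := by
  induction n using Nat.strong_induction_on with
  | _ n ih =>
    by_cases h10 : n < 10
    · rw [pvDigits_lt h10]
      interval_cases n <;> decide
    · rw [pvDigits_ge h10]
      rcases hcons : pvDigits (n / 10) with _ | ⟨a, t⟩
      · exact absurd hcons (pvDigits_ne_nil _)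
      · have hprev := ih (n / 10) (Nat.div_lt_self (by omega) (by omega)) (by omega)
        rw [hcons] at hprev
        have h2 : a ≠ '0' := by simpa using hprev
        simpa using h2

lemma pvVal_shift (ds : List Char) : ∀ a : Nat,
    ds.foldl (fun v ch => v * 10 + (ch.toNat - 48)) a = a * 10 ^ ds.length + pvVal ds := by
  induction ds with
  | nil => intro a; simp [pvVal]
  | cons c t ih =>
    intro a
    have h1 : (c :: t).foldl (fun v ch => v * 10 + (ch.toNat - 48)) a
        = (a * 10 + (c.toNat - 48)) * 10 ^ t.length + pvVal t := by
      rw [List.foldl_cons, ih]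
    have h2 : pvVal (c :: t) = (0 * 10 + (c.toNat - 48)) * 10 ^ t.length + pvVal t := by
      rw [pvVal, List.foldl_cons, ih]
    rw [h1, h2, List.length_cons]
    ring

lemma pvVal_append (ds : List Char) (d : Char) :
    pvVal (ds ++ [d]) = pvVal ds * 10 + (d.toNat - 48) := by
  rw [pvVal, List.foldl_append]
  rfl

lemma pvVal_pvDigits (n : Nat) : pvVal (pvDigits n) = n := by
  induction n using Nat.strong_induction_on with
  | _ n ih =>
    by_cases h : n < 10
    · rw [pvDigits_lt h, pvVal]
      simp [pv_digitChar_toNat h]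
    · rw [pvDigits_ge h, pvVal_append,
        ih (n / 10) (Nat.div_lt_self (by omega) (by omega)),
        pv_digitChar_toNat (Nat.mod_lt _ (by omega))]
      omega

lemma pvVal_pos (ds : List Char) (hdig : ∀ c ∈ ds, PySem.Chars.isdigit c = true)
    (hhead : ds.head? ≠ some '0') (hne : ds ≠ []) : 1 ≤ pvVal ds := by
  rcases ds with _ | ⟨c, t⟩
  · exact absurd rfl hne
  · have hc : c ≠ '0' := by intro h; exact hhead (by simp [h])
    have h49 : 49 ≤ c.toNat := pv_ne_zero_char (hdig c (by simp)) hc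
    rw [pvVal]
    simp only [List.foldl_cons]
    rw [pvVal_shift]
    have hp : 1 ≤ 10 ^ t.length := Nat.one_le_pow _ _ (by omega)
    have : 1 ≤ (0 * 10 + (c.toNat - 48)) * 10 ^ t.length := by
      have h1 : 1 ≤ c.toNat - 48 := by omega
      calc 1 = 1 * 1 := by ring
      _ ≤ (c.toNat - 48) * 10 ^ t.length := Nat.mul_le_mul h1 hp
      _ = (0 * 10 + (c.toNat - 48)) * 10 ^ t.length := by ring
    omega

lemma pvDigits_pvVal : ∀ ds : List Char, (∀ c ∈ ds, PySem.Chars.isdigit c = true) →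
    ds.head? ≠ some '0' → ds ≠ [] → pvDigits (pvVal ds) = ds := by
  intro ds
  induction ds using List.reverseRecOn with
  | nil => intro _ _ hne; exact absurd rfl hne
  | append_singleton ds d ih =>
    intro hdig hhead _
    have hd : PySem.Chars.isdigit d = true := hdig d (by simp)
    have hdb := pv_isdigit_bounds hd
    rcases eq_or_ne ds [] with hnil | hne'
    · subst hnil
      simp only [List.nil_append]
      have hv : pvVal [d] = d.toNat - 48 := by rw [pvVal]; simp
      rw [hv, pvDigits_lt (by omega), pv_digitChar_val hd]
    · have hdig' : ∀ c ∈ ds, PySem.Chars.isdigit c = true := fun c hc => hdig c (by simp [hc])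
      have hd0 : ds.head? ≠ some '0' := by
        rcases ds with _ | ⟨a, t⟩
        · exact absurd rfl hne'
        · simpa using hhead
      have hvpos : 1 ≤ pvVal ds := pvVal_pos ds hdig' hd0 hne'
      have hval : pvVal (ds ++ [d]) = pvVal ds * 10 + (d.toNat - 48) := pvVal_append ds d
      have hbig : ¬ pvVal (ds ++ [d]) < 10 := by omega
      rw [pvDigits_ge hbig]
      have hdiv : pvVal (ds ++ [d]) / 10 = pvVal ds := by omega
      have hmod : pvVal (ds ++ [d]) % 10 = d.toNat - 48 := by omega
      rw [hdiv, hmod, ih hdig' hd0 hne', pv_digitChar_val hd]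

-- the parser recognises exactly the strings prefix ++ str(k), k ≥ 1
lemma pvParse_mk (pre : String) {k : Nat} (hk : 1 ≤ k) :
    pvParse pre (pvF pre k) = some k := by
  have hlist := pvF_toList pre k
  have hrest : PySem.List.slice (pvF pre k).toList (some (PySem.Str.len pre)) none
      = pvDigits k := by
    rw [PySem.Str.len_eq, hlist]
    rw [show ((pre.toList.length : Int)) = ((pre.toList.length : Nat) : Int) by simp,
      PySem.List.slice_from_natCast]
    exact List.drop_left
  rw [pvParse]
  rw [if_pos (by
    rw [PySem.Str.startswith_eq, hlist]
    exact (PySem.Chars.startswith_iff _ _).mpr (List.prefix_append _ _))]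
  simp only [hrest]
  rw [if_pos (by
    constructor
    · rw [PySem.Chars.strIsdigit]
      simp only [Bool.and_eq_true, Bool.not_eq_true', List.isEmpty_eq_false_iff]
      exact ⟨pvDigits_ne_nil k, List.all_eq_true.mpr (pvDigits_all_isdigit k)⟩
    · rw [PySem.List.pyGet?_zero, ← List.head?_eq_getElem?]
      exact pvDigits_head hk)]
  rw [show (pvDigits k).foldl (fun v ch => v * 10 + (ch.toNat - 48)) 0 = pvVal (pvDigits k) from rfl,
    pvVal_pvDigits]

lemma pvParse_sound (pre c : String) {k : Nat} (h : pvParse pre c = some k) :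
    1 ≤ k ∧ c = pvF pre k := by
  rw [pvParse] at h
  by_cases hsw : PySem.Str.startswith c pre = true
  · rw [if_pos hsw] at h
    rw [PySem.Str.startswith_eq] at hsw
    obtain ⟨rest0, hc⟩ := (PySem.Chars.startswith_iff _ _).mp hsw
    have hrest : PySem.List.slice c.toList (some (PySem.Str.len pre)) none = rest0 := by
      rw [PySem.Str.len_eq, ← hc]
      rw [show ((pre.toList.length : Int)) = ((pre.toList.length : Nat) : Int) by simp,
        PySem.List.slice_from_natCast]
      exact List.drop_left
    simp only [hrest] at h
    by_cases hdig : PySem.Chars.strIsdigit rest0 = true ∧ PySem.List.pyGet? rest0 0 ≠ some '0'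
    · rw [if_pos hdig] at h
      obtain ⟨hd, h0⟩ := hdig
      rw [PySem.Chars.strIsdigit] at hd
      simp only [Bool.and_eq_true, Bool.not_eq_true', List.isEmpty_eq_false_iff] at hd
      obtain ⟨hne, hall⟩ := hd
      have hall' : ∀ x ∈ rest0, PySem.Chars.isdigit x = true := List.all_eq_true.mp hall
      rw [PySem.List.pyGet?_zero, ← List.head?_eq_getElem?] at h0
      have hkval : pvVal rest0 = k := by
        have := h; simp only [Option.some.injEq] at this; exact this
      have hpos : 1 ≤ k := hkval ▸ pvVal_pos rest0 hall' h0 hne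
      refine ⟨hpos, ?_⟩
      rw [← String.toList_inj, pvF_toList, ← hc, ← hkval, pvDigits_pvVal rest0 hall' h0 hne]
    · rw [if_neg hdig] at h; exact absurd h (by simp)
  · rw [if_neg hsw] at h; exact absurd h (by simp)

lemma pvF_inj (pre : String) {k m : Nat} (hk : 1 ≤ k) (hm : 1 ≤ m)
    (h : pvF pre k = pvF pre m) : k = m := by
  have h1 := pvParse_mk pre hk
  rw [h, pvParse_mk pre hm] at h1
  simpa using h1.symm

-- pigeonhole: some code among prefix1 … prefix(L+1) is unused
lemma pv_exists_free (pre : String) (all : List String) :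
    ∃ m : Nat, m ≤ all.length ∧ pvF pre (m + 1) ∉ all := by
  by_contra hcon
  push Not at hcon
  set R := (List.range (all.length + 1)).map (fun i => pvF pre (i + 1)) with hR
  have hsub : R ⊆ all := by
    intro x hx
    obtain ⟨i, hi, hxi⟩ := List.mem_map.mp hx
    rw [List.mem_range] at hi
    exact hxi ▸ hcon i (by omega)
  have hnd : R.Nodup := by
    refine List.Nodup.map_on ?_ (List.nodup_range)
    intro i _ j _ hij
    have := pvF_inj pre (by omega : 1 ≤ i + 1) (by omega : 1 ≤ j + 1) hij
    omega
  have hlen : R.length = all.length + 1 := by simp [hR]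
  have hcard : R.length ≤ all.length := by
    calc R.length = R.toFinset.card := (List.toFinset_card_of_nodup hnd).symm
    _ ≤ all.toFinset.card := Finset.card_le_card (fun x hx => List.mem_toFinset.mpr (hsub (List.mem_toFinset.mp hx)))
    _ ≤ all.length := all.toFinset_card_le
  omega

-- A's loop returns the least free code
lemma pvALoop_eq (ex us : List String) (pre : String) (N : Nat)
    (hfree : pvF pre N ∉ ex ++ us)
    (hmin : ∀ j, 1 ≤ j → j < N → pvF pre j ∈ ex ++ us) :
    ∀ (fuel j : Nat), 1 ≤ j → j ≤ N → N < j + fuel →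
      pvALoop ex us pre fuel (j : Int) = pvF pre N := by
  intro fuel
  induction fuel with
  | zero => intro j h1 h2 h3; omega
  | succ f ih =>
    intro j h1 h2 h3
    simp only [pvALoop]
    by_cases hj : j = N
    · subst hj
      rw [if_pos (by
        rw [List.mem_append] at hfree
        push Not at hfree
        exact hfree)]
      rfl
    · have hlt : j < N := lt_of_le_of_ne h2 hj
      rw [if_neg (by
        have := hmin j h1 hlt
        rw [List.mem_append] at this
        tauto)]
      rw [show (j : Int) + 1 = ((j + 1 : Nat) : Int) by push_cast; ring]
      exact ih (j + 1) (by omega) (by omega) (by omega)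

-- B's sweep returns the least value ≥ e missing from a sorted list
lemma pvSweep_spec : ∀ (xs : List Nat), xs.Pairwise (· ≤ ·) → ∀ e : Nat,
    e ≤ pvSweep xs e ∧ pvSweep xs e ∉ xs ∧
      ∀ m, e ≤ m → m < pvSweep xs e → m ∈ xs := by
  intro xs
  induction xs with
  | nil =>
    intro _ e
    refine ⟨le_refl _, by simp [pvSweep], ?_⟩
    intro m hm hlt
    simp [pvSweep] at hlt
    omega
  | cons v t ih =>
    intro hp e
    obtain ⟨hv, ht⟩ := List.pairwise_cons.mp hp
    simp only [pvSweep]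
    split_ifs with h1 h2
    · -- v = e, advance
      obtain ⟨ha, hb, hc⟩ := ih ht (e + 1)
      refine ⟨by omega, ?_, ?_⟩
      · intro hmem
        rcases List.mem_cons.mp hmem with hve | hmt
        · omega
        · exact hb hmt
      · intro m hm hlt
        rcases eq_or_lt_of_le hm with hme | hme
        · exact List.mem_cons.mpr (Or.inl (by omega))
        · exact List.mem_cons.mpr (Or.inr (hc m (by omega) hlt))
    · -- e < v, stop
      refine ⟨le_refl _, ?_, ?_⟩
      · intro hmem
        rcases List.mem_cons.mp hmem with hve | hmt
        · omega
        · exact absurd (hv e hmt) (by omega)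
      · intro m hm hlt; omega
    · -- v < e, skip
      have hvlt : v < e := by omega
      obtain ⟨ha, hb, hc⟩ := ih ht e
      refine ⟨ha, ?_, ?_⟩
      · intro hmem
        rcases List.mem_cons.mp hmem with hve | hmt
        · omega
        · exact hb hmt
      · intro m hm hlt
        exact List.mem_cons.mpr (Or.inr (hc m hm hlt))

-- Source B's accumulator loop builds the filterMap
lemma pv_taken_eq (pre : String) : ∀ (l : List String) (acc : List Nat),
    l.foldl (fun acc c => match pvParse pre c with | some v => acc ++ [v] | none => acc) acc
      = acc ++ l.filterMap (pvParse pre) := by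
  intro l
  induction l with
  | nil => intro acc; simp
  | cons c t ih =>
    intro acc
    simp only [List.foldl_cons, List.filterMap_cons]
    cases h : pvParse pre c with
    | none => simp [ih]
    | some v => simp [ih]

-- ===== VERDICT (by name: the statement is the Claim_ definition above) =====
theorem next_available_emp_code_py_spec : Claim_equal_next_available_emp_code_py := by
  intro ex us pre _hdom
  unfold Spec_next_available_emp_code_py
  -- name both sides through pvF
  -- the least free index, via Nat.find
  have hEx0 := pv_exists_free pre (ex ++ us)
  have hEx : ∃ m : Nat, pvF pre (m + 1) ∉ ex ++ us := ⟨hEx0.choose, hEx0.choose_spec.2⟩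
  set N0 := Nat.find hEx with hN0
  have hNfree : pvF pre (N0 + 1) ∉ ex ++ us := Nat.find_spec hEx
  have hNmin : ∀ j, 1 ≤ j → j < N0 + 1 → pvF pre j ∈ ex ++ us := by
    intro j h1 h2
    have := Nat.find_min hEx (m := j - 1) (by omega)
    have hj : j - 1 + 1 = j := by omega
    rw [hj] at this
    by_contra hnot
    exact this hnot
  have hNbound : N0 ≤ (ex ++ us).length :=
    Nat.find_min' hEx hEx0.choose_spec.2 |>.trans hEx0.choose_spec.1
  -- A's side
  have hA : next_available_emp_code_py ex us pre = pvF pre (N0 + 1) := by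
    rw [next_available_emp_code_py]
    have hlen : ex.length + us.length = (ex ++ us).length := (List.length_append).symm
    rw [show ((1 : Int)) = ((1 : Nat) : Int) by simp]
    exact pvALoop_eq ex us pre (N0 + 1) hNfree hNmin _ 1 (by omega) (by omega) (by omega)
  -- B's side
  have hB : next_available_emp_code_py_alt ex us pre
      = pvF pre (pvSweep (PySem.List.sorted ((ex ++ us).filterMap (pvParse pre)) (fun x => x) false) 1) := by
    simp only [next_available_emp_code_py_alt]
    rw [pv_taken_eq pre (ex ++ us) []]
    rfl
  set tk := (ex ++ us).filterMap (pvParse pre) with htk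
  set st := PySem.List.sorted tk (fun x => x) false with hst
  have hpw : st.Pairwise (· ≤ ·) := by
    have := PySem.List.sorted_pairwise tk (fun x => x)
    simpa using this
  obtain ⟨ha, hb, hc⟩ := pvSweep_spec st hpw 1
  set S := pvSweep st 1 with hS
  have hmemT : ∀ k : Nat, 1 ≤ k → (k ∈ tk ↔ pvF pre k ∈ ex ++ us) := by
    intro k hk
    constructor
    · intro hmem
      obtain ⟨c, hcmem, hcp⟩ := List.mem_filterMap.mp hmem
      obtain ⟨_, hceq⟩ := pvParse_sound pre c hcp
      exact hceq ▸ hcmem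
    · intro hmem
      exact List.mem_filterMap.mpr ⟨pvF pre k, hmem, pvParse_mk pre hk⟩
  have hmemS : ∀ k : Nat, (k ∈ st ↔ k ∈ tk) := fun k => PySem.List.mem_sorted tk _ _ k
  -- the two least indices agree
  have hSN : S = N0 + 1 := by
    rcases Nat.lt_trichotomy S (N0 + 1) with hlt | heq | hgt
    · exfalso
      have hmem : pvF pre S ∈ ex ++ us := hNmin S ha hlt
      exact hb ((hmemS S).mpr ((hmemT S ha).mpr hmem))
    · exact heq
    · exfalso
      have hmem : N0 + 1 ∈ st := hc (N0 + 1) (by omega) hgt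
      exact hNfree ((hmemT (N0 + 1) (by omega)).mp ((hmemS (N0 + 1)).mp hmem))
  rw [hA, hB, hSN]
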